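-- pv_equiv track=rewrite | github.com/ukantjadia/Must_Know_programm | project_Euler-net/powerDigitSum.py | solution
-- ===== SOURCE A (Python) =====
-- def solution(power):
--     num = 2**power
--     string_num = str(num)
--     list_num = list(string_num)
--     sum_of_num = 0
--     for i in list_num:
--         sum_of_num += int(i)
--
--     return sum_of_num
-- ===== SOURCE B (Python) =====
-- def _digit_sum(n):
--     if n < 10**32:
--         total = 0
--         while n > 0:
--             n, d = divmod(n, 10)
--             total += d
--         return total
--     k = max(1, n.bit_length() * 3 // 20)
--     q, r = divmod(n, 10**k)
--     return _digit_sum(q) + _digit_sum(r)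
--
-- def solution(power):
--     num = 2 ** power
--     return _digit_sum(num)
-- ===== Notes on version B (the rewrite author's own statement) =====
-- stated objective: faster
-- what changed: B sums the digits arithmetically — a divide-and-conquer divmod split down to a small divmod loop — instead of converting the number to a string and summing int(char) over its characters; Pre_ excludes negative exponents, where Python's power operator yields a float and A raises ValueError inside int().
import Mathlib
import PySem

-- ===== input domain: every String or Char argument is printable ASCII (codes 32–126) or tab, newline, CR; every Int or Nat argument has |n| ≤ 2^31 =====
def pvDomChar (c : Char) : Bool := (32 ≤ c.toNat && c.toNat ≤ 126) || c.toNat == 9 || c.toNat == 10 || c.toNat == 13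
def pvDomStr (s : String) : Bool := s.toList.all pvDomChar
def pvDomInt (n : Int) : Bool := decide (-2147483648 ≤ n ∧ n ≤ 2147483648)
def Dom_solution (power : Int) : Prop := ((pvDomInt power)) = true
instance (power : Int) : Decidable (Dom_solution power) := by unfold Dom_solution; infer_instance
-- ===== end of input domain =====

-- B replaces A's string conversion + per-character int() by arithmetic digit extraction: a divide-and-conquer divmod split down to a small divmod loop.


-- ===== PORT A =====
-- int(i) for the one-character string i; the 0 default is never reached under Pre_ (digit chars only)
def pvIntOfChar (c : Char) : Int := (PySem.Int.ofChars? [c]).getD 0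

-- 2**power: exact for power ≥ 0 (Pre_); Python gives a float for negative power (A then raises ValueError)
def solution (power : Int) : Int :=
  let num : Int := 2 ^ power.toNat
  let string_num : String := PySem.Int.toStr num
  let list_num : List Char := string_num.toList
  list_num.foldl (fun sum_of_num i => sum_of_num + pvIntOfChar i) 0

-- ===== PORT B =====
-- inner while of _digit_sum: while n > 0: n, d = divmod(n, 10); total += d
def pvDigitLoop (num total : Int) : Int :=
  if 0 < num then pvDigitLoop (PySem.Int.floordiv num 10) (total + PySem.Int.mod num 10)
  else total
termination_by num.toNat
decreasing_by
  have h10 : (0:Int) < 10 := by norm_num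
  rw [PySem.Int.floordiv_eq_ediv_of_pos h10]
  omega

-- fact the recursion of _digit_sum needs: the split point 10^k stays below n (cited in decreasing_by)
lemma pvTenPowLe (n : Int) (h : 10 ^ 32 ≤ n) :
    (10 : Int) ^ (max 1 (PySem.Int.bitLength n * 3 / 20)) ≤ n := by
  have hn0 : n ≠ 0 := by positivity
  have hlt := PySem.Int.lt_two_pow_bitLength n
  have hle := PySem.Int.two_pow_bitLength_le n hn0
  have habs : n.natAbs = n.toNat := by omega
  have hbig : 10 ^ 32 ≤ n.toNat := by omega
  have hbl : 107 ≤ PySem.Int.bitLength n := by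
    by_contra hc
    push Not at hc
    have h1 : n.natAbs < 2 ^ 106 :=
      lt_of_lt_of_le hlt (Nat.pow_le_pow_right (by norm_num) (by omega))
    have h2 : (2:Nat) ^ 106 < 10 ^ 32 := by norm_num
    omega
  set bl := PySem.Int.bitLength n with hblDef
  have hk : max 1 (bl * 3 / 20) = bl * 3 / 20 := by omega
  rw [hk]
  have h4k : 4 * (bl * 3 / 20) ≤ bl - 1 := by omega
  have h1 : (10 : Nat) ^ (bl * 3 / 20) ≤ 2 ^ (4 * (bl * 3 / 20)) := by
    rw [pow_mul]
    exact Nat.pow_le_pow_left (by norm_num) _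
  have h2 : (2 : Nat) ^ (4 * (bl * 3 / 20)) ≤ 2 ^ (bl - 1) :=
    Nat.pow_le_pow_right (by norm_num) h4k
  have h3 : (10 : Nat) ^ (bl * 3 / 20) ≤ n.toNat := le_trans (le_trans h1 h2) (habs ▸ hle)
  calc (10 : Int) ^ (bl * 3 / 20) = ((10 ^ (bl * 3 / 20) : Nat) : Int) := by push_cast; ring
    _ ≤ (n.toNat : Int) := by exact_mod_cast h3
    _ = n := Int.toNat_of_nonneg (by omega)

-- _digit_sum(n): small numbers by the divmod loop, large ones split by divmod(n, 10**k)
def pvDigitSum (n : Int) : Int :=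
  if n < 10 ^ 32 then
    pvDigitLoop n 0
  else
    let k : Nat := max 1 (PySem.Int.bitLength n * 3 / 20)
    let q : Int := PySem.Int.floordiv n (10 ^ k)
    let r : Int := PySem.Int.mod n (10 ^ k)
    pvDigitSum q + pvDigitSum r
termination_by n.toNat
decreasing_by
  · have hpos : (0:Int) < 10 ^ (max 1 (PySem.Int.bitLength n * 3 / 20)) := by positivity
    rw [PySem.Int.floordiv_eq_ediv_of_pos hpos]
    have h1 : (1:Int) < 10 ^ (max 1 (PySem.Int.bitLength n * 3 / 20)) := by
      calc (1:Int) < 10 ^ 1 := by norm_num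
        _ ≤ _ := pow_le_pow_right₀ (by norm_num) (le_max_left _ _)
    have hlt : n / 10 ^ (max 1 (PySem.Int.bitLength n * 3 / 20)) < n := by
      apply Int.ediv_lt_of_lt_mul (by omega)
      nlinarith
    have hdiv : 0 ≤ n / 10 ^ (max 1 (PySem.Int.bitLength n * 3 / 20)) :=
      Int.ediv_nonneg (by omega) (by omega)
    omega

  · have hn : (10:Int) ^ 32 ≤ n := by omega
    have hk := pvTenPowLe n hn
    have hpos : (0:Int) < 10 ^ (max 1 (PySem.Int.bitLength n * 3 / 20)) := by positivity
    rw [PySem.Int.mod_eq_emod_of_pos hpos]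
    have := Int.emod_lt_of_pos n hpos
    have := Int.emod_nonneg n (by omega : (10:Int) ^ (max 1 (PySem.Int.bitLength n * 3 / 20)) ≠ 0)
    omega

def solution_alt (power : Int) : Int :=
  let num : Int := 2 ^ power.toNat
  pvDigitSum num

-- ===== PRECONDITION & SPEC =====
-- Pre_ excludes power < 0: there Python's 2**power is a float and A raises ValueError in int('.')
def Pre_solution (power : Int) : Prop := 0 ≤ power
instance (power : Int) : Decidable (Pre_solution power) := by unfold Pre_solution; infer_instance
def pvWitness_solution : Int := (5)
def Spec_solution (power : Int) (out : Int) : Prop := out = solution_alt power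
instance (power : Int) (out : Int) : Decidable (Spec_solution power out) := by unfold Spec_solution; infer_instance

-- ===== CLAIM (what is proved, stated in full; the proofs are below) =====
def Claim_equal_solution : Prop := ∀ (power : Int), Dom_solution power → Pre_solution power → Spec_solution power (solution power)

-- ===== LEMMAS AND PROOFS =====

-- digit sum of a natural number, recursion matching toDigitsCore's stopping rule
def pvS (n : Nat) : Int :=
  if h : n / 10 = 0 then (n % 10 : Nat)
  else (n % 10 : Nat) + pvS (n / 10)
termination_by n
decreasing_by omega

lemma pvS_zero : pvS 0 = 0 := by rw [pvS]; simp

lemma pvS_eq (n : Nat) : pvS n = ((n % 10 : Nat) : Int) + pvS (n / 10) := by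
  conv_lhs => rw [pvS]
  by_cases h0 : n / 10 = 0
  · rw [dif_pos h0, h0, pvS_zero]; ring
  · rw [dif_neg h0]

lemma pvIntOfChar_digitChar (d : Nat) (hd : d < 10) :
    pvIntOfChar (Nat.digitChar d) = (d : Int) := by
  interval_cases d <;> decide

lemma foldl_add_eq_sum_map (cs : List Char) (s : Int) :
    cs.foldl (fun acc i => acc + pvIntOfChar i) s = s + (cs.map pvIntOfChar).sum := by
  induction cs generalizing s with
  | nil => simp
  | cons c cs ih => simp [List.foldl, ih]; ring

lemma toDigitsCore_sum (f : Nat) : ∀ (n : Nat) (acc : List Char), n < f →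
    ((Nat.toDigitsCore 10 f n acc).map pvIntOfChar).sum = pvS n + (acc.map pvIntOfChar).sum := by
  induction f with
  | zero => intro n acc h; omega
  | succ f ih =>
    intro n acc h
    rw [Nat.toDigitsCore]
    by_cases h0 : n / 10 = 0
    · simp only [h0, if_true, List.map_cons, List.sum_cons]
      rw [pvIntOfChar_digitChar _ (Nat.mod_lt _ (by norm_num))]
      conv_rhs => rw [pvS]
      rw [dif_pos h0]
    · simp only [h0, if_false]
      have hlt : n / 10 < f := by omega
      rw [ih (n / 10) _ hlt]
      simp only [List.map_cons, List.sum_cons]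
      rw [pvIntOfChar_digitChar _ (Nat.mod_lt _ (by norm_num))]
      conv_rhs => rw [pvS]
      rw [dif_neg h0]
      ring

lemma pvDigitLoop_eq (n : Nat) : ∀ (t : Int), pvDigitLoop (n : Int) t = t + pvS n := by
  induction n using Nat.strong_induction_on with
  | _ n ih =>
    intro t
    rw [pvDigitLoop]
    by_cases hn : 0 < (n : Int)
    · simp only [hn, if_true]
      have hn' : 0 < n := by exact_mod_cast hn
      have h10 : (10 : Int) = ((10 : Nat) : Int) := rfl
      rw [h10, PySem.Int.floordiv_natCast n 10, PySem.Int.mod_natCast n 10,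
        ih (n / 10) (by omega)]
      conv_rhs => rw [pvS_eq n]
      ring
    · simp only [hn, if_false]
      have : n = 0 := by omega
      subst this
      rw [pvS_zero]; simp

-- digit sum is additive over a base-10^k split
lemma pvS_split (k : Nat) : ∀ (q r : Nat), r < 10 ^ k → pvS (q * 10 ^ k + r) = pvS q + pvS r := by
  induction k with
  | zero =>
    intro q r hr
    have : r = 0 := by omega
    subst this
    simp [pvS_zero]
  | succ k ih =>
    intro q r hr
    have hsplit : q * 10 ^ (k + 1) + r = r + q * 10 ^ k * 10 := by ring
    rw [pvS_eq (q * 10 ^ (k + 1) + r)]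
    rw [show (q * 10 ^ (k + 1) + r) % 10 = r % 10 by
      rw [hsplit, Nat.add_mul_mod_self_right]]
    rw [show (q * 10 ^ (k + 1) + r) / 10 = q * 10 ^ k + r / 10 by
      rw [hsplit, Nat.add_mul_div_right _ _ (by norm_num)]; omega]
    have hr10 : r / 10 < 10 ^ k := by
      have : r < 10 ^ k * 10 := by rw [← pow_succ]; exact hr
      omega
    rw [ih q (r / 10) hr10]
    conv_rhs => rw [pvS_eq r]
    ring

lemma pvDigitSum_eq (m : Nat) : pvDigitSum (m : Int) = pvS m := by
  induction m using Nat.strong_induction_on with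
  | _ m ih =>
    rw [pvDigitSum]
    by_cases hsm : (m : Int) < 10 ^ 32
    · rw [if_pos hsm, pvDigitLoop_eq m 0]; ring
    · rw [if_neg hsm]
      have hn : (10:Int) ^ 32 ≤ (m : Int) := by omega
      have hk := pvTenPowLe (m : Int) hn
      set kk : Nat := max 1 (PySem.Int.bitLength (m : Int) * 3 / 20) with hkk
      have hcast : (10 : Int) ^ kk = ((10 ^ kk : Nat) : Int) := by push_cast; ring
      show pvDigitSum (PySem.Int.floordiv (m : Int) (10 ^ kk)) +
        pvDigitSum (PySem.Int.mod (m : Int) (10 ^ kk)) = pvS m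
      rw [hcast, PySem.Int.floordiv_natCast m (10 ^ kk), PySem.Int.mod_natCast m (10 ^ kk)]
      have hkpos : 1 ≤ 10 ^ kk := Nat.one_le_pow _ _ (by norm_num)
      have hkle : 10 ^ kk ≤ m := by
        have : ((10 ^ kk : Nat) : Int) ≤ (m : Int) := hcast ▸ hk
        exact_mod_cast this
      have hmpos : 0 < m := by
        have : (0:Int) < (m:Int) := by omega
        exact_mod_cast this
      have hkgt1 : 1 < 10 ^ kk := by
        have : 1 ≤ kk := le_max_left _ _
        calc 1 < 10 ^ 1 := by norm_num
          _ ≤ 10 ^ kk := Nat.pow_le_pow_right (by norm_num) this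
      rw [ih (m / 10 ^ kk) (Nat.div_lt_self hmpos hkgt1),
        ih (m % 10 ^ kk) (lt_of_lt_of_le (Nat.mod_lt _ (by omega)) hkle)]
      rw [← pvS_split kk (m / 10 ^ kk) (m % 10 ^ kk) (Nat.mod_lt _ (by omega))]
      rw [Nat.div_add_mod']

lemma solution_eq_alt (power : Int) (_ : 0 ≤ power) :
    solution power = solution_alt power := by
  unfold solution solution_alt
  set m : Nat := (2 : Int) ^ power.toNat |>.toNat with hm
  have hpos : (0:Int) ≤ 2 ^ power.toNat := by positivity
  have hcast : ((2:Int) ^ power.toNat) = (m : Int) := by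
    rw [hm]; exact (Int.toNat_of_nonneg hpos).symm
  rw [hcast]
  have hA : (PySem.Int.toStr (m : Int)).toList = Nat.toDigits 10 m := by
    rw [PySem.Int.toList_toStr]
    simp only [PySem.Int.toChars]
    rw [if_neg (by exact_mod_cast Int.not_lt.mpr (Int.natCast_nonneg m))]
    simp
  simp only [hA]
  rw [foldl_add_eq_sum_map, Nat.toDigits]
  rw [toDigitsCore_sum (m + 1) m [] (by omega)]
  rw [pvDigitSum_eq m]
  simp

-- ===== VERDICT (by name: the statement is the Claim_ definition above) =====
theorem solution_spec : Claim_equal_solution := by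
  intro power _ hpre
  unfold Spec_solution
  exact solution_eq_alt power hpre
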